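-- pv_equiv track=rewrite | github.com/muabnesor/SV-pipeline | scripts/SV-filter.py | get_alt_samples
-- ===== SOURCE A (Python) =====
-- def get_alt_samples(genotype_dict):
--
--     het_list = []
--     hom_list = []
--
--     for key, value in genotype_dict.items():
--         if value == "HET":
--             het_list.append(key)
--         if value == "ALT_HOM":
--             hom_list.append(key)
--
--     return het_list, hom_list
-- ===== SOURCE B (Python) =====
-- def get_alt_samples(genotype_dict):
--     groups = {}
--     for key, value in genotype_dict.items():
--         groups.setdefault(value, []).append(key)
--     return groups.get("HET", []), groups.get("ALT_HOM", [])
-- ===== Notes on version B (the rewrite author's own statement) =====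
-- stated objective: idiomatic
-- what changed: B groups keys into a dict keyed by genotype value in one pass and then selects the HET and ALT_HOM buckets, instead of A's two per-iteration equality branches appending to two dedicated lists.
import Mathlib
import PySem

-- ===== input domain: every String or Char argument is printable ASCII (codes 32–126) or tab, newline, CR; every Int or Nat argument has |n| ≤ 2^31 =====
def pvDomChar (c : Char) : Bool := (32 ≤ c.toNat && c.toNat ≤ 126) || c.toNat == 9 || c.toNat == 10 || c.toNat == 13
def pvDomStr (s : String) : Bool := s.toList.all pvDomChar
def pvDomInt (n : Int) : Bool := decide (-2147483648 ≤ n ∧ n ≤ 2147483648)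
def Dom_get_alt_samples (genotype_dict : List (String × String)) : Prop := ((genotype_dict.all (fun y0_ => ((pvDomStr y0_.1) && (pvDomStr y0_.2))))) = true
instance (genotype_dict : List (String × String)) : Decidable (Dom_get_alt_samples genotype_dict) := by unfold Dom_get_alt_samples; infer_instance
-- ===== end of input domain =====

-- B groups keys into a dict keyed by genotype value (one pass), then selects the
-- "HET" and "ALT_HOM" buckets; A appends to two dedicated lists via two equality branches.


-- ===== PORT A =====
-- loop body: two sequential `if`s appending to het_list / hom_list
def get_alt_samples (genotype_dict : List (String × String)) : List String × List String :=
  genotype_dict.foldl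
    (fun acc p =>
      let acc1 := if p.2 == "HET" then (acc.1 ++ [p.1], acc.2) else acc
      if p.2 == "ALT_HOM" then (acc1.1, acc1.2 ++ [p.1]) else acc1)
    ([], [])

-- ===== PORT B =====
-- groups.setdefault(value, []).append(key)  ==  groups[value] = groups.get(value, []) + [key]  ==  Dict.modify
def get_alt_samples_alt (genotype_dict : List (String × String)) : List String × List String :=
  let groups : PySem.Dict String (List String) :=
    genotype_dict.foldl (fun d p => d.modify p.2 [] (· ++ [p.1])) PySem.Dict.empty
  (groups.getD "HET" [], groups.getD "ALT_HOM" [])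

-- ===== PRECONDITION & SPEC =====
def Spec_get_alt_samples (genotype_dict : List (String × String)) (out : List String × List String) : Prop := out = get_alt_samples_alt genotype_dict
instance (genotype_dict : List (String × String)) (out : List String × List String) : Decidable (Spec_get_alt_samples genotype_dict out) := by unfold Spec_get_alt_samples; infer_instance

-- ===== CLAIM (what is proved, stated in full; the proofs are below) =====
def Claim_equal_get_alt_samples : Prop := ∀ (genotype_dict : List (String × String)), Dom_get_alt_samples genotype_dict → Spec_get_alt_samples genotype_dict (get_alt_samples genotype_dict)

-- ===== LEMMAS AND PROOFS =====

-- A's accumulator loop collects, in order, the keys whose value is "HET" / "ALT_HOM".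
theorem get_alt_samples_foldl_char (l : List (String × String)) (het hom : List String) :
    l.foldl
      (fun acc p =>
        let acc1 := if p.2 == "HET" then (acc.1 ++ [p.1], acc.2) else acc
        if p.2 == "ALT_HOM" then (acc1.1, acc1.2 ++ [p.1]) else acc1)
      (het, hom)
    = (het ++ (l.filter (fun p => p.2 == "HET")).map (·.1),
       hom ++ (l.filter (fun p => p.2 == "ALT_HOM")).map (·.1)) := by
  induction l generalizing het hom with
  | nil => simp
  | cons p rest ih =>
    simp only [List.foldl_cons, List.filter_cons]
    by_cases h1 : p.2 = "HET" <;> by_cases h2 : p.2 = "ALT_HOM" <;>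
      simp_all [ih]

-- B's grouping dict, looked up at v, yields the keys whose value is v, in order.
theorem get_alt_samples_group_char (l : List (String × String)) (v : String) :
    (l.foldl (fun d p => d.modify p.2 [] (· ++ [p.1])) PySem.Dict.empty).getD v []
    = (l.filter (fun p => p.2 == v)).map (·.1) := by
  have h := PySem.Dict.getD_foldl_modify_append (l := l.map Prod.swap)
    (d := (PySem.Dict.empty : PySem.Dict String (List String))) (c := v)
  simpa [List.foldl_map, List.filter_map, List.map_map, Function.comp, Prod.swap] using h

-- ===== VERDICT (by name: the statement is the Claim_ definition above) =====
theorem get_alt_samples_spec : Claim_equal_get_alt_samples := by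
  intro l _
  show get_alt_samples l = get_alt_samples_alt l
  rw [get_alt_samples, get_alt_samples_alt, get_alt_samples_foldl_char,
    get_alt_samples_group_char, get_alt_samples_group_char]
  simp
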